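-- pv_equiv track=rewrite | github.com/BoarQing/CS380P | project3/check.py | GetHashList
-- ===== SOURCE A (Python) =====
-- def hash(l):
--     sorted_list = sorted(l)
--     h = 1
--     for val in sorted_list:
--         new_val = val + 2
--         h = (h * new_val + new_val) % 1000
--     return h
--
-- def GetHashList(tree_list):
--     ret = {}
--     for i in range(len(tree_list)):
--         h = hash(tree_list[i])
--         if h in ret:
--             ret[h].append(i)
--         else:
--             ret[h] = [i]
--     return ret
-- ===== SOURCE B (Python) =====
-- def hash(l):
--     sorted_list = sorted(l)
--     h = 1
--     for val in sorted_list: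
--         new_val = val + 2
--         h = (h * new_val + new_val) % 1000
--     return h
--
-- def GetHashList(tree_list):
--     hashes = [hash(t) for t in tree_list]
--     return {h: [i for i, x in enumerate(hashes) if x == h]
--             for h in dict.fromkeys(hashes)}
-- ===== Notes on version B (the rewrite author's own statement) =====
-- stated objective: alternative
-- what changed: Replaces the streaming if/else dict insertion with a two-phase pipeline: hash every tree once into a list, then build the result as a comprehension over the deduplicated hashes, gathering each key's indices by filtering the enumerated hash list.
import Mathlib
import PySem

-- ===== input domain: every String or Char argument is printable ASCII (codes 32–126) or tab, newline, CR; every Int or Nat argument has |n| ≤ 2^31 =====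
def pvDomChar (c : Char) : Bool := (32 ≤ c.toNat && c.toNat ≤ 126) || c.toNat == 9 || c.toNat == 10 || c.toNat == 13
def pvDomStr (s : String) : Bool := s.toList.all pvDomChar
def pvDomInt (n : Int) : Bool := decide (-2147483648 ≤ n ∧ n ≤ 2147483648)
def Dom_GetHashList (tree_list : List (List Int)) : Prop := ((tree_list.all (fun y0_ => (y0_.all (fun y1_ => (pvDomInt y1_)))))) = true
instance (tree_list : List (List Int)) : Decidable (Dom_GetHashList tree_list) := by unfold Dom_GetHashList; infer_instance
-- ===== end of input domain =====

-- B replaces A's streaming if/else dict insertion by a two-phase pipeline (hash list, then a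
-- comprehension over the deduplicated hashes gathering indices by filtering); alternative, not faster.


-- ===== PORT A =====
def hashA (l : List Int) : Int :=
  let sorted_list := PySem.List.sorted l (fun x => x) false
  sorted_list.foldl (fun h val =>
    let new_val := val + 2
    PySem.Int.mod (h * new_val + new_val) 1000) 1

def GetHashList (tree_list : List (List Int)) : List (Int × List Int) :=
  let ret : PySem.Dict Int (List Int) :=
    (PySem.List.pyRange 0 (PySem.List.len tree_list)).foldl
      (fun ret i =>
        let h := hashA (PySem.List.pyGetD tree_list i [])
        if ret.contains h then
          ret.insert h (ret.getD h [] ++ [i])      -- ret[h].append(i)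
        else
          ret.insert h [i]) PySem.Dict.empty
  ret.items

-- ===== PORT B =====
def hashB (l : List Int) : Int :=
  let sorted_list := PySem.List.sorted l (fun x => x) false
  sorted_list.foldl (fun h val =>
    let new_val := val + 2
    PySem.Int.mod (h * new_val + new_val) 1000) 1

def GetHashList_alt (tree_list : List (List Int)) : List (Int × List Int) :=
  let hashes := tree_list.map hashB
  -- keys of dict.fromkeys(hashes) are distinct, so the comprehension's dict is this assoc list
  (PySem.List.dedup hashes).map (fun h =>
    (h, ((PySem.List.enumerate hashes).filter (fun p => p.2 == h)).map (fun p => p.1)))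

-- ===== PRECONDITION & SPEC =====
def Spec_GetHashList (tree_list : List (List Int)) (out : List (Int × List Int)) : Prop := out = GetHashList_alt tree_list
instance (tree_list : List (List Int)) (out : List (Int × List Int)) : Decidable (Spec_GetHashList tree_list out) := by unfold Spec_GetHashList; infer_instance

-- ===== CLAIM (what is proved, stated in full; the proofs are below) =====
def Claim_equal_GetHashList : Prop := ∀ (tree_list : List (List Int)), Dom_GetHashList tree_list → Spec_GetHashList tree_list (GetHashList tree_list)

-- ===== LEMMAS AND PROOFS =====

-- A's loop body (if h in ret … else …) is exactly 'ret[h] = ret.get(h, []) + [i]', i.e. Dict.modify.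
theorem stepA_eq_modify (d : PySem.Dict Int (List Int)) (h i : Int) :
    (if d.contains h then d.insert h (d.getD h [] ++ [i]) else d.insert h [i])
      = d.modify h [] (fun xs => xs ++ [i]) := by
  by_cases hc : d.contains h
  · simp [hc, PySem.Dict.modify]
  · simp only [Bool.not_eq_true] at hc
    simp [hc, PySem.Dict.modify, PySem.Dict.getD_of_not_contains d [] hc]

theorem enumerate_map {α β : Type} (f : α → β) (xs : List α) (s : Int) :
    PySem.List.enumerate (xs.map f) s = (PySem.List.enumerate xs s).map (fun p => (p.1, f p.2)) := by
  induction xs generalizing s with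
  | nil => simp [PySem.List.enumerate_nil]
  | cons x xs ih => simp [PySem.List.enumerate_cons, ih]

theorem GetHashList_spec : Claim_equal_GetHashList := by
  intro tl _
  unfold Spec_GetHashList GetHashList GetHashList_alt
  -- rewrite A's fold over range(len) as a fold over the (hash, index) pairs
  have hpairs :
      (PySem.List.pyRange 0 (PySem.List.len tl)).foldl
        (fun ret i =>
          let h := hashA (PySem.List.pyGetD tl i [])
          if ret.contains h then ret.insert h (ret.getD h [] ++ [i]) else ret.insert h [i])
        PySem.Dict.empty
      = ((PySem.List.enumerate tl).map (fun p => (hashA p.2, p.1))).foldl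
          (fun d p => d.modify p.1 [] (fun xs => xs ++ [p.2])) PySem.Dict.empty := by
    rw [PySem.List.enumerate_eq_map_pyRange tl [], List.map_map, List.foldl_map]
    refine PySem.List.foldl_congr_mem _ _ _ _ (fun d i _ => ?_)
    simpa using stepA_eq_modify d (hashA (PySem.List.pyGetD tl i [])) i
  rw [hpairs]
  set l := (PySem.List.enumerate tl).map (fun p => (hashA p.2, p.1)) with hl
  set D := l.foldl (fun d p => d.modify p.1 [] (fun xs => xs ++ [p.2])) PySem.Dict.empty with hD
  have hkeysnd : D.keys.Nodup :=
    PySem.Dict.nodup_keys_foldl_modify_key l Prod.fst [] (fun _ p xs => xs ++ [p.2])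
      PySem.Dict.empty PySem.Dict.nodup_keys_empty
  have hkeys : D.keys = PySem.List.dedup (tl.map hashA) := by
    rw [hD, PySem.Dict.keys_foldl_modify_key l Prod.fst [] (fun _ p xs => xs ++ [p.2]),
      PySem.Dict.keys_empty, PySem.Set.update_nil_left, hl, List.map_map]
    simp only [PySem.List.dedup_eq_ofList]
    rw [show ((Prod.fst ∘ fun p : Int × List Int => (hashA p.2, p.1))
        = fun p : Int × List Int => hashA p.2) from rfl,
      show (fun p : Int × List Int => hashA p.2)
        = (hashA ∘ fun p : Int × List Int => p.2) from rfl,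
      ← List.map_map, PySem.List.map_snd_enumerate]
  rw [PySem.Dict.items_eq_map_keys D hkeysnd [], hkeys,
    show tl.map hashB = tl.map hashA from rfl]
  apply List.map_congr_left
  intro k hk
  have hg : D.getD k [] = (l.filter (fun p => p.1 == k)).map (fun p => p.2) := by
    rw [hD]; simpa using PySem.Dict.getD_foldl_modify_append l PySem.Dict.empty k
  rw [hg, hl, enumerate_map hashA tl 0, List.filter_map, List.filter_map,
    List.map_map, List.map_map]
  simp [Function.comp_def]
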